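-- pv_equiv track=rewrite | github.com/veryfansome/curriculum | curriculum/math_curriculum.py | is_denominator_of_terminating_decimal
-- ===== SOURCE A (Python) =====
-- def is_denominator_of_terminating_decimal(simplified_denominator):
--     """Check prime factors of the simplified denominator"""
--     assert simplified_denominator != 0, "Can't divide by zero"
--     simplified_denominator = abs(simplified_denominator)
--     # Repeatedly divide out factors of 2 and 5
--     while simplified_denominator % 2 == 0:
--         simplified_denominator //= 2
--     while simplified_denominator % 5 == 0:
--         simplified_denominator //= 5
--     # If the remaining denominator is 1, only 2 and 5 were factors.
--     return simplified_denominator == 1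
-- ===== SOURCE B (Python) =====
-- from math import gcd
--
-- def is_denominator_of_terminating_decimal(simplified_denominator):
--     """Check prime factors of the simplified denominator"""
--     assert simplified_denominator != 0, "Can't divide by zero"
--     n = abs(simplified_denominator)
--     # 10**bit_length(n) carries at least as many 2s and 5s as n can, so the
--     # gcd below is exactly the 2^a * 5^b part of n.
--     g = gcd(n, 10 ** n.bit_length())
--     return n // g == 1
-- ===== Notes on version B (the rewrite author's own statement) =====
-- stated objective: simpler
-- what changed: Replaces the two factor-stripping while-loops by a single closed-form gcd check: gcd(n, 10**n.bit_length()) is exactly the 2^a*5^b part of n, so n//g == 1 decides termination without any loop.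
import Mathlib
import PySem

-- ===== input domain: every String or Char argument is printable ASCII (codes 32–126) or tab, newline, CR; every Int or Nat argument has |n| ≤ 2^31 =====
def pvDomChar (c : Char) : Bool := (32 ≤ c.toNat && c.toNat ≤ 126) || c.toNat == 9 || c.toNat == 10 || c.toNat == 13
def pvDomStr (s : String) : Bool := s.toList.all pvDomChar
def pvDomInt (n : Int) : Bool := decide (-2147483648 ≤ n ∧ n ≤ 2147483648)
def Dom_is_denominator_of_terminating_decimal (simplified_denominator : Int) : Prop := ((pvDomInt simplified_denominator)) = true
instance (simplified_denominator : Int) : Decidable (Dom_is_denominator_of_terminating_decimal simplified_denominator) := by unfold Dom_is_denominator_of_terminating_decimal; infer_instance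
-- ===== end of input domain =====

-- B replaces A's two factor-stripping while-loops by one closed-form gcd check
-- (gcd with 10^bit_length extracts exactly the 2^a*5^b part); objective: simpler.


-- ===== PORT A =====
-- A's 'while n % p == 0: n //= p' loop; after 'abs' the value is a nonnegative
-- int, ported as Nat ('//' and '%' on nonnegative ints coincide with Nat '/' '%').
-- The '1 < p ∧ 0 < n' parts of the guard only make the recursion total: both hold
-- wherever Python reaches the loop (p is the literal 2 or 5; the assert gives n ≠ 0).
def pyStrip (p n : Nat) : Nat :=
  if h : 1 < p ∧ 0 < n ∧ n % p = 0 then pyStrip p (n / p) else n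
termination_by n
decreasing_by exact Nat.div_lt_self h.2.1 h.1

def is_denominator_of_terminating_decimal (simplified_denominator : Int) : Bool :=
  -- assert simplified_denominator != 0  → excluded by Pre_
  let n := simplified_denominator.natAbs        -- abs(...)
  decide (pyStrip 5 (pyStrip 2 n) = 1)          -- the two while-loops, then '== 1'

-- ===== PORT B =====
def is_denominator_of_terminating_decimal_alt (simplified_denominator : Int) : Bool :=
  -- assert simplified_denominator != 0  → excluded by Pre_
  let n := simplified_denominator.natAbs        -- abs(...)
  let g := Nat.gcd n (10 ^ Nat.size n)          -- gcd(n, 10 ** n.bit_length())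
  decide (n / g = 1)                            -- n // g == 1

-- ===== PRECONDITION & SPEC =====
-- A's assert raises AssertionError on 0; Pre_ excludes exactly that input.
def Pre_is_denominator_of_terminating_decimal (simplified_denominator : Int) : Prop :=
  simplified_denominator ≠ 0
instance (simplified_denominator : Int) : Decidable (Pre_is_denominator_of_terminating_decimal simplified_denominator) := by unfold Pre_is_denominator_of_terminating_decimal; infer_instance
def pvWitness_is_denominator_of_terminating_decimal : Int := 40

def Spec_is_denominator_of_terminating_decimal (simplified_denominator : Int) (out : Bool) : Prop := out = is_denominator_of_terminating_decimal_alt simplified_denominator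
instance (simplified_denominator : Int) (out : Bool) : Decidable (Spec_is_denominator_of_terminating_decimal simplified_denominator out) := by unfold Spec_is_denominator_of_terminating_decimal; infer_instance

-- ===== CLAIM (what is proved, stated in full; the proofs are below) =====
def Claim_equal_is_denominator_of_terminating_decimal : Prop := ∀ (simplified_denominator : Int), Dom_is_denominator_of_terminating_decimal simplified_denominator → Pre_is_denominator_of_terminating_decimal simplified_denominator → Spec_is_denominator_of_terminating_decimal simplified_denominator (is_denominator_of_terminating_decimal simplified_denominator)

-- ===== LEMMAS AND PROOFS =====

-- Each pyStrip run divides out some power of p.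
lemma pyStrip_factor (p : Nat) : ∀ n : Nat, ∃ a, n = p ^ a * pyStrip p n := by
  intro n
  induction n using Nat.strong_induction_on with
  | _ n ih =>
    rw [pyStrip]
    split
    · next h =>
      obtain ⟨a, ha⟩ := ih (n / p) (Nat.div_lt_self h.2.1 h.1)
      refine ⟨a + 1, ?_⟩
      have hd : p * (n / p) = n := Nat.mul_div_cancel' (Nat.dvd_of_mod_eq_zero h.2.2) 
      calc n = p * (n / p) := hd.symm
        _ = p * (p ^ a * pyStrip p (n / p)) := by rw [← ha]
        _ = p ^ (a + 1) * pyStrip p (n / p) := by ring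
    · exact ⟨0, by simp⟩

lemma pyStrip_two_pow (a b : Nat) : pyStrip 2 (2 ^ a * 5 ^ b) = 5 ^ b := by
  induction a with
  | zero =>
    rw [pyStrip]
    have hodd : 5 ^ b % 2 = 1 := by
      rw [Nat.pow_mod]; simp
    rw [dif_neg]
    · simp
    · simp [hodd]
  | succ a ih =>
    have key : 2 ^ (a + 1) * 5 ^ b = 2 * (2 ^ a * 5 ^ b) := by ring
    rw [key, pyStrip, dif_pos ⟨by norm_num, by positivity, Nat.mul_mod_right 2 _⟩,
      Nat.mul_div_cancel_left _ (by norm_num), ih]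

lemma pyStrip_five_pow (b : Nat) : pyStrip 5 (5 ^ b) = 1 := by
  induction b with
  | zero =>
    rw [pyStrip]
    norm_num
  | succ b ih =>
    have key : 5 ^ (b + 1) = 5 * 5 ^ b := by ring
    rw [key, pyStrip, dif_pos ⟨by norm_num, by positivity, Nat.mul_mod_right 5 _⟩,
      Nat.mul_div_cancel_left _ (by norm_num), ih]

-- A returns true exactly when n = 2^a * 5^b.
lemma A_char (n : Nat) (hn : 0 < n) :
    pyStrip 5 (pyStrip 2 n) = 1 ↔ ∃ a b, n = 2 ^ a * 5 ^ b := by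
  constructor
  · intro h
    obtain ⟨a, ha⟩ := pyStrip_factor 2 n
    obtain ⟨b, hb⟩ := pyStrip_factor 5 (pyStrip 2 n)
    exact ⟨a, b, by rw [ha, hb, h, Nat.mul_one]⟩
  · rintro ⟨a, b, rfl⟩
    rw [pyStrip_two_pow, pyStrip_five_pow]

-- B returns true exactly when n = 2^a * 5^b.
lemma B_char (n : Nat) (hn : 0 < n) :
    n / Nat.gcd n (10 ^ Nat.size n) = 1 ↔ ∃ a b, n = 2 ^ a * 5 ^ b := by
  set L := Nat.size n with hL
  have hgdvd : Nat.gcd n (10 ^ L) ∣ n := Nat.gcd_dvd_left _ _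
  have hgpos : 0 < Nat.gcd n (10 ^ L) := Nat.gcd_pos_of_pos_left _ hn
  have hdiv1 : n / Nat.gcd n (10 ^ L) = 1 ↔ n = Nat.gcd n (10 ^ L) := by
    rw [Nat.div_eq_iff_eq_mul_left hgpos hgdvd]; simp
  have hdvd : n = Nat.gcd n (10 ^ L) ↔ n ∣ 10 ^ L := by
    constructor
    · intro h; rw [h]; exact Nat.gcd_dvd_right _ _
    · intro h; exact (Nat.gcd_eq_left h).symm
  rw [hdiv1, hdvd]
  have h10 : (10 : Nat) ^ L = 2 ^ L * 5 ^ L := by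
    rw [show (10 : Nat) = 2 * 5 from rfl, Nat.mul_pow]
  rw [h10]
  constructor
  · intro h
    obtain ⟨m', n', hm', hn', hmn⟩ := (Nat.dvd_mul).mp h
    obtain ⟨i, _, rfl⟩ := (Nat.dvd_prime_pow Nat.prime_two).mp hm'
    obtain ⟨j, _, rfl⟩ := (Nat.dvd_prime_pow (by norm_num : Nat.Prime 5)).mp hn'
    exact ⟨i, j, hmn.symm⟩
  · rintro ⟨a, b, rfl⟩
    have hlt : 2 ^ a * 5 ^ b < 2 ^ L := hL ▸ Nat.lt_size_self _
    have ha : a ≤ L := by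
      have h1 : 2 ^ a ≤ 2 ^ a * 5 ^ b := Nat.le_mul_of_pos_right _ (by positivity)
      have : (2:Nat) ^ a < 2 ^ L := lt_of_le_of_lt h1 hlt
      exact le_of_lt ((Nat.pow_lt_pow_iff_right (by norm_num)).mp this)
    have hb : b ≤ L := by
      have h1 : (2:Nat) ^ b ≤ 5 ^ b := Nat.pow_le_pow_left (by norm_num) _
      have h2 : (5:Nat) ^ b ≤ 2 ^ a * 5 ^ b := Nat.le_mul_of_pos_left _ (by positivity)
      have : (2:Nat) ^ b < 2 ^ L := lt_of_le_of_lt (le_trans h1 h2) hlt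
      exact le_of_lt ((Nat.pow_lt_pow_iff_right (by norm_num)).mp this)
    exact Nat.mul_dvd_mul (Nat.pow_dvd_pow 2 ha) (Nat.pow_dvd_pow 5 hb)

-- ===== VERDICT (by name: the statement is the Claim_ definition above) =====
theorem is_denominator_of_terminating_decimal_spec : Claim_equal_is_denominator_of_terminating_decimal := by
  intro x _ hpre
  unfold Spec_is_denominator_of_terminating_decimal
  unfold is_denominator_of_terminating_decimal is_denominator_of_terminating_decimal_alt
  have hn : 0 < x.natAbs := Int.natAbs_pos.mpr hpre
  exact decide_eq_decide.mpr ((A_char _ hn).trans (B_char _ hn).symm)
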